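-- pv_equiv track=rewrite | github.com/Socrates94/Ida_project | experiments/generator.py | create_goal_board
-- ===== SOURCE A (Python) =====
-- def create_goal_board(n):
--     """
--     Crea el tablero meta para dimensión n.
--     Ejemplo 3x3:
--     1 2 3
--     4 5 6
--     7 8 0
--     """
--     board = []
--     value = 1
--     for i in range(n):
--         row = []
--         for j in range(n):
--             if value == n * n:
--                 row.append(0)
--             else:
--                 row.append(value)
--             value += 1
--         board.append(row)
--     return board
-- ===== SOURCE B (Python) =====
-- def create_goal_board(n):
--     """
--     Crea el tablero meta para dimensión n.
--     Build the flat sequence 1..n*n-1 followed by 0, then chunk into rows.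
--     """
--     if n <= 0:
--         return []
--     flat = list(range(1, n * n)) + [0]
--     return [flat[i * n:(i + 1) * n] for i in range(n)]
-- ===== Notes on version B (the rewrite author's own statement) =====
-- stated objective: simpler
-- what changed: Replaces the nested increment-and-branch loop (counter with a per-cell sentinel test for n*n) by a two-phase build-then-chunk: the flat sequence list(range(1,n*n))+[0] encodes the trailing 0 directly, then rows are produced by slicing.
import Mathlib
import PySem

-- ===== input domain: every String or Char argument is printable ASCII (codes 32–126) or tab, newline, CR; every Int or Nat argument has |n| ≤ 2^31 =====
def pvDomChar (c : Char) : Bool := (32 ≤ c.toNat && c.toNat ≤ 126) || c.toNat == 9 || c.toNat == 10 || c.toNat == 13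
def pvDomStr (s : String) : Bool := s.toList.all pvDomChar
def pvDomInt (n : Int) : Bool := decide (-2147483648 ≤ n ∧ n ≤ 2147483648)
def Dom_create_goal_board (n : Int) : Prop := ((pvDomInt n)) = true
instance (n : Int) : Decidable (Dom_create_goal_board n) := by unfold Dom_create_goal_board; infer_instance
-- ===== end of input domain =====

-- B builds the flat sequence 1..n*n-1 followed by 0 once and chunks it into rows by slicing,
-- replacing A's nested counter loop with its per-cell sentinel test. Same O(n^2) cost.

-- ===== PORT A =====
def create_goal_board (n : Int) : List (List Int) :=
  let st :=
    (PySem.List.pyRange 0 n 1).foldl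
      (fun (st : List (List Int) × Int) _ =>
        let inner :=
          (PySem.List.pyRange 0 n 1).foldl
            (fun (st2 : List Int × Int) _ =>
              (st2.1 ++ [if st2.2 == n * n then 0 else st2.2], st2.2 + 1))
            ([], st.2)
        (st.1 ++ [inner.1], inner.2))
      ([], 1)
  st.1

-- ===== PORT B =====
def create_goal_board_alt (n : Int) : List (List Int) :=
  if n ≤ 0 then []
  else
    let flat := PySem.List.pyRange 1 (n * n) 1 ++ [0]
    (PySem.List.pyRange 0 n 1).map
      (fun i => PySem.List.slice flat (some (i * n)) (some ((i + 1) * n)))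

-- ===== PRECONDITION & SPEC =====
def Spec_create_goal_board (n : Int) (out : List (List Int)) : Prop := out = create_goal_board_alt n
instance (n : Int) (out : List (List Int)) : Decidable (Spec_create_goal_board n out) := by unfold Spec_create_goal_board; infer_instance

-- ===== CLAIM (what is proved, stated in full; the proofs are below) =====
def Claim_equal_create_goal_board : Prop := ∀ (n : Int), Dom_create_goal_board n → Spec_create_goal_board n (create_goal_board n)

-- ===== LEMMAS AND PROOFS =====

-- A's inner loop appends, cell by cell, the values v, v+1, … with the sentinel test.
theorem pv_inner (n v : Int) (row : List Int) (m : Nat) :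
    (List.range m).foldl
        (fun (st2 : List Int × Int) _ =>
          (st2.1 ++ [if st2.2 == n * n then 0 else st2.2], st2.2 + 1))
        (row, v)
      = (row ++ (List.range m).map
            (fun (k : Nat) => if v + (k : Int) == n * n then 0 else v + (k : Int)), v + m) := by
  induction m generalizing row v with
  | zero => simp
  | succ m ih =>
      rw [List.range_succ, List.foldl_append, ih, List.map_append]
      simp
      ring

-- A's outer loop: after r rows the counter is 1 + r*n and the board is the first r rows.
theorem pv_outer (n : Int) (m r : Nat) :
    (List.range r).foldl
        (fun (st : List (List Int) × Int) _ =>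
          (st.1 ++ [((List.range m).foldl
              (fun (st2 : List Int × Int) _ =>
                (st2.1 ++ [if st2.2 == n * n then 0 else st2.2], st2.2 + 1))
              ([], st.2)).1],
           ((List.range m).foldl
              (fun (st2 : List Int × Int) _ =>
                (st2.1 ++ [if st2.2 == n * n then 0 else st2.2], st2.2 + 1))
              ([], st.2)).2))
        ([], 1)
      = ((List.range r).map (fun (i : Nat) =>
            (List.range m).map
              (fun (k : Nat) => if 1 + (i : Int) * m + k == n * n then 0
                        else 1 + (i : Int) * m + k)),
         1 + (r : Int) * m) := by
  induction r with
  | zero => simp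
  | succ r ih =>
      rw [List.range_succ, List.foldl_append, ih]
      simp only [List.foldl_cons, List.foldl_nil, pv_inner]
      rw [List.map_append, Prod.mk.injEq]
      exact ⟨by simp, by push_cast; ring⟩

-- Chunking a map over range: drop/take of the flat sequence is a shifted map.
theorem pv_chunk {α : Type} (f : Nat → α) (a b N : Nat) (h : a + b ≤ N) :
    (((List.range N).map f).drop a).take b
      = (List.range b).map (fun k => f (a + k)) := by
  apply List.ext_getElem
  · simp
    omega
  · intro i h1 h2
    simp at h1 ⊢

-- The flat sequence B builds, as a map over range.
theorem pv_flat (n : Int) (m : Nat) (hm : 0 < m) (hn : n = (m : Int)) :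
    PySem.List.pyRange 1 (n * n) 1 ++ [0]
      = (List.range (m * m)).map
          (fun (k : Nat) => if (k : Int) + 1 == n * n then 0 else (k : Int) + 1) := by
  subst hn
  have hM : 1 ≤ m * m := Nat.one_le_iff_ne_zero.mpr (by positivity)
  rw [PySem.List.pyRange_one]
  have h1 : (((m : Int) * m) - 1).toNat = m * m - 1 := by
    have : ((m : Int) * m) = ((m * m : Nat) : Int) := by push_cast; ring
    omega
  rw [h1]
  have h2 : m * m = (m * m - 1) + 1 := by omega
  rw [h2, List.range_succ, List.map_append]
  congr 1
  · apply List.map_congr_left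
    intro k hk
    simp only [List.mem_range] at hk
    have hMcast : ((m * m : Nat) : Int) = (m : Int) * m := by push_cast; ring
    have hne : (k : Int) + 1 ≠ (m : Int) * m := by
      rw [← hMcast]
      exact_mod_cast (by omega : ¬ (k + 1 = m * m))
    simp [hne]
    omega
  · have he : ((m * m - 1 : Nat) : Int) + 1 = (m : Int) * m := by push_cast [hM]; ring
    simp [he]

theorem create_goal_board_eq_alt (n : Int) : create_goal_board n = create_goal_board_alt n := by
  by_cases hpos : 0 < n
  · have hn : n = ((n.toNat : Nat) : Int) := by omega
    set m : Nat := n.toNat with hmdef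
    have hm : 0 < m := by omega
    have hr : PySem.List.pyRange 0 n 1 = (List.range m).map (fun (k : Nat) => ((k : Int))) := by
      rw [PySem.List.pyRange_one]
      have : (n - 0).toNat = m := by omega
      rw [this]
      simp
    simp only [create_goal_board, create_goal_board_alt, hr, List.foldl_map, List.map_map,
      if_neg (by omega : ¬ n ≤ 0)]
    rw [pv_outer n m m, pv_flat n m hm hn]
    apply List.map_congr_left
    intro i hi
    simp only [List.mem_range] at hi
    simp only [Function.comp_apply]
    have hb1 : (i : Int) * n = ((i * m : Nat) : Int) := by
      rw [hn]; push_cast; ring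
    have hb2 : ((i : Int) + 1) * n = ((i * m + m : Nat) : Int) := by
      rw [hn]; push_cast; ring
    rw [hb1, hb2, PySem.List.slice_natCast]
    have hsub : i * m + m - i * m = m := by omega
    rw [hsub, pv_chunk _ (i * m) m (m * m) (by nlinarith)]
    apply List.map_congr_left
    intro k hk
    have hc : ((i * m + k : Nat) : Int) + 1 = 1 + (i : Int) * m + k := by push_cast; ring
    rw [hc]
  · have hnil : PySem.List.pyRange 0 n 1 = [] := PySem.List.pyRange_one_eq_nil (by omega)
    unfold create_goal_board create_goal_board_alt
    rw [hnil, if_pos (by omega : n ≤ 0)]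
    simp

-- ===== VERDICT (by name: the statement is the Claim_ definition above) =====
theorem create_goal_board_spec : Claim_equal_create_goal_board := by
  intro n _
  exact create_goal_board_eq_alt n
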